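-- pv_equiv track=rewrite | github.com/netalydana28/Python2 | Practice10/3.py | set_free
-- ===== SOURCE A (Python) =====
-- def set_free(prison):
--     locked = 0
--     unlocked = 1
--     alt_prison = list()
--     freed_prisoners = list()
--
--     for i in range(len(prison)):
--         if prison[i] == 0:
--             alt_prison.append(1)
--         elif prison[i] == 1:
--             alt_prison.append(0)
--
--     motion = True
--
--     def clear_list(free):
--         for i in range(free+1):
--             prison.pop(0)
--             alt_prison.pop(0)
--
--     if prison[0] == 1:
--         while (motion and 1 in prison) or ( not motion and 1 in alt_prison):
--
--             if motion:
--                 free = prison.index(1)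
--                 freed_prisoners.append(free)
--                 clear_list(free)
--                 motion = False
--             else:
--                 free = alt_prison.index(1)
--                 freed_prisoners.append(free)
--                 clear_list(free)
--                 motion = True
--
--     return len(freed_prisoners)
-- ===== SOURCE B (Python) =====
-- def set_free(prison):
--     # Return-value equivalent to A (A mutates its argument; B does not).
--     if prison[0] != 1:
--         return 0
--     count = 1
--     for prev, cur in zip(prison, prison[1:]):
--         if cur != prev:
--             count += 1
--     return count
-- ===== Notes on version B (the rewrite author's own statement) =====
-- stated objective: faster
-- what changed: Replaces the repeated index/pop(0) simulation on two mirrored lists by a single forward scan that counts runs of equal values (1 + number of adjacent transitions) after checking the first element is 1.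
-- outside the precondition, e.g. on set_free([1, 2]): A returns 1, B returns 2; on set_free([1, 1, 2, 0]): A returns 2, B returns 3; on set_free([1, 2, 0, 1]): A raises IndexError, B returns 4
import Mathlib
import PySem

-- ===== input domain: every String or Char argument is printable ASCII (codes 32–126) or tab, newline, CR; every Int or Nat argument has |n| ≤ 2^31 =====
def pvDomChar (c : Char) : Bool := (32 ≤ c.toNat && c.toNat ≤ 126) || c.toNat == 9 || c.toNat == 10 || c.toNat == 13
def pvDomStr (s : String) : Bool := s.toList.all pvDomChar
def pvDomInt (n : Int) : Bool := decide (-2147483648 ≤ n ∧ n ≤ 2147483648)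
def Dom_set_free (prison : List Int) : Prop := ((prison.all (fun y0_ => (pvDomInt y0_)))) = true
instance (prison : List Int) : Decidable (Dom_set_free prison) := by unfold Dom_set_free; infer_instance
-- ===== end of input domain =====

-- B replaces A's O(n^2) repeated index/pop(0) simulation by one O(n) scan counting runs of
-- equal values; equivalence is about the RETURN value only (A pops its argument in place, B does not).

-- ===== PORT A =====
-- the first for-loop building alt_prison (0 -> append 1, 1 -> append 0, else skip)
def buildAlt (prison : List Int) : List Int :=
  prison.foldl (fun acc x => if x = 0 then acc ++ [1] else if x = 1 then acc ++ [0] else acc) []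

-- clear_list(free): pop the front of both lists free+1 times; none = IndexError (a pop fails)
def clearList : Nat → List Int → List Int → Option (List Int × List Int)
  | 0, _ :: p', _ :: a' => some (p', a')
  | k + 1, _ :: p', _ :: a' => clearList k p' a'
  | _, _, _ => none

-- the while loop; fuel only makes it total (each Python iteration pops ≥ 1 element, so
-- prison.length + 1 fuel is never exhausted on admitted inputs); on a raise we return the junk len
def loopA : Nat → List Int → List Int → List Int → Bool → Int
  | 0, _, _, freed, _ => (freed.length : Int)
  | fuel + 1, p, alt, freed, motion =>
    if (motion && p.contains 1) || (!motion && alt.contains 1) then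
      if motion then
        match PySem.List.index? p 1 with
        | some free =>
          match clearList free p alt with
          | some (p', a') => loopA fuel p' a' (freed ++ [(free : Int)]) false
          | none => (freed.length : Int)
        | none => (freed.length : Int)
      else
        match PySem.List.index? alt 1 with
        | some free =>
          match clearList free p alt with
          | some (p', a') => loopA fuel p' a' (freed ++ [(free : Int)]) true
          | none => (freed.length : Int)
        | none => (freed.length : Int)
    else (freed.length : Int)

def set_free (prison : List Int) : Int :=
  let alt := buildAlt prison
  match PySem.List.pyGet? prison 0 with
  | some v => if v = 1 then loopA (prison.length + 1) prison alt [] true else 0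
  | none => 0  -- prison[0] raised IndexError (excluded by Pre_)

-- ===== PORT B =====
def set_free_alt (prison : List Int) : Int :=
  match PySem.List.pyGet? prison 0 with
  | none => 0  -- prison[0] raised IndexError (excluded by Pre_)
  | some v =>
    if v ≠ 1 then 0
    else (prison.zip prison.tail).foldl (fun c pc => if pc.2 ≠ pc.1 then c + 1 else c) 1

-- ===== PRECONDITION & SPEC =====
-- Pre_ excludes the empty list (prison[0] raises IndexError) and lists starting with 1 that
-- contain a value other than 0/1: there A's alt_prison is misaligned with prison, so A either
-- raises IndexError in clear_list or returns an accidental count.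
def Pre_set_free (prison : List Int) : Prop :=
  prison ≠ [] ∧ (prison.head? = some 1 → ∀ x ∈ prison, x = 0 ∨ x = 1)
instance (prison : List Int) : Decidable (Pre_set_free prison) := by unfold Pre_set_free; infer_instance

def pvWitness_set_free : List Int := [1, 0, 0, 1, 1]

def Spec_set_free (prison : List Int) (out : Int) : Prop := out = set_free_alt prison
instance (prison : List Int) (out : Int) : Decidable (Spec_set_free prison out) := by unfold Spec_set_free; infer_instance

-- ===== CLAIM (what is proved, stated in full; the proofs are below) =====
def Claim_equal_set_free : Prop := ∀ (prison : List Int), Dom_set_free prison → Pre_set_free prison → Spec_set_free prison (set_free prison)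

-- ===== LEMMAS AND PROOFS =====

-- alternating search: length of the free-first-target / toggle-target / drop-past-it chain
def runsF (p : List Int) (t : Int) : Int :=
  match h : PySem.List.index? p t with
  | none => 0
  | some i => 1 + runsF (p.drop (i + 1)) (1 - t)
termination_by p.length
decreasing_by
  obtain ⟨hk, -, -⟩ := PySem.List.getElem_of_index?_eq_some h
  simp only [List.length_drop]; omega

-- number of adjacent transitions
def transR : List Int → Int
  | a :: b :: r => (if b ≠ a then 1 else 0) + transR (b :: r)
  | _ => 0

lemma foldTrans : ∀ (p : List Int) (c : Int),
    (p.zip p.tail).foldl (fun c pc => if pc.2 ≠ pc.1 then c + 1 else c) c = c + transR p := by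
  intro p
  induction p with
  | nil => intro c; simp [transR]
  | cons a p ih =>
    intro c
    cases p with
    | nil => simp [transR]
    | cons b r =>
      simp only [List.tail_cons, List.zip_cons_cons, List.foldl_cons]
      rw [show ((b :: r).zip r).foldl (fun c pc => if pc.2 ≠ pc.1 then c + 1 else c)
            (if b ≠ a then c + 1 else c)
          = (if b ≠ a then c + 1 else c) + transR (b :: r) from by
            have := ih (if b ≠ a then c + 1 else c); simpa using this]
      rw [show transR (a :: b :: r) = (if b ≠ a then 1 else 0) + transR (b :: r) from rfl]
      split_ifs <;> ring

lemma buildAlt_eq_aux (p : List Int) (hb : ∀ x ∈ p, x = 0 ∨ x = 1) (acc : List Int) :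
    p.foldl (fun acc x => if x = 0 then acc ++ [1] else if x = 1 then acc ++ [0] else acc) acc
      = acc ++ p.map (fun x => 1 - x) := by
  induction p generalizing acc with
  | nil => simp
  | cons x p ih =>
    have hx := hb x (by simp)
    have hb' : ∀ y ∈ p, y = 0 ∨ y = 1 := fun y hy => hb y (by simp [hy])
    rcases hx with h | h <;> subst h <;> simp [ih hb']

lemma buildAlt_eq (p : List Int) (hb : ∀ x ∈ p, x = 0 ∨ x = 1) :
    buildAlt p = p.map (fun x => 1 - x) := by
  simpa using buildAlt_eq_aux p hb []

lemma index_flip (p : List Int) :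
    PySem.List.index? (p.map (fun x => 1 - x)) 1 = PySem.List.index? p 0 := by
  induction p with
  | nil => simp [PySem.List.index?]
  | cons x p ih =>
    by_cases hx : x = 0
    · subst hx
      rw [List.map_cons, show (1 : Int) - 0 = 1 from by norm_num,
          PySem.List.index?_cons_self, PySem.List.index?_cons_self]
    · have h1 : (1 : Int) - x ≠ 1 := by omega
      rw [List.map_cons, PySem.List.index?_cons_of_ne _ h1,
          PySem.List.index?_cons_of_ne _ hx, ih]

lemma contains_flip (p : List Int) :
    (p.map (fun x => 1 - x)).contains 1 = p.contains 0 := by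
  simp only [List.contains_eq_mem, List.mem_map]
  by_cases h : (0 : Int) ∈ p
  · simp [h]
  · simp [h]

lemma clearList_eq : ∀ (k : Nat) (p a : List Int), k < p.length → k < a.length →
    clearList k p a = some (p.drop (k + 1), a.drop (k + 1)) := by
  intro k
  induction k with
  | zero => intro p a hp ha; cases p with
    | nil => simp at hp
    | cons x p' => cases a with
      | nil => simp at ha
      | cons y a' => simp [clearList]
  | succ k ih => intro p a hp ha; cases p with
    | nil => simp at hp
    | cons x p' => cases a with
      | nil => simp at ha
      | cons y a' =>
        simp only [clearList, List.drop_succ_cons]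
        exact ih p' a' (by simpa using hp) (by simpa using ha)

lemma runsF_of_index_none {p : List Int} {t : Int} (h : PySem.List.index? p t = none) :
    runsF p t = 0 := by
  rw [runsF.eq_def]; split
  · rfl
  · rename_i i hi; rw [h] at hi; cases hi

lemma runsF_of_index_some {p : List Int} {t : Int} {i : Nat}
    (h : PySem.List.index? p t = some i) :
    runsF p t = 1 + runsF (p.drop (i + 1)) (1 - t) := by
  rw [runsF.eq_def]; split
  · rename_i hn; rw [h] at hn; cases hn
  · rename_i j hj; rw [h] at hj; cases hj; rfl

lemma runsF_cons_ne {x u : Int} (p : List Int) (h : x ≠ u) :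
    runsF (x :: p) u = runsF p u := by
  rcases hi : PySem.List.index? p u with _ | i
  · rw [runsF_of_index_none hi, runsF_of_index_none]
    rw [PySem.List.index?_cons_of_ne _ h, hi]; rfl
  · rw [runsF_of_index_some hi,
        runsF_of_index_some (by rw [PySem.List.index?_cons_of_ne _ h, hi]; rfl)]
    simp [List.drop_succ_cons]

lemma runsF_cons_self (x : Int) (p : List Int) :
    runsF (x :: p) x = 1 + runsF p (1 - x) := by
  rw [runsF_of_index_some (PySem.List.index?_cons_self x p)]
  simp

-- the main loop invariant: with alt the flipped copy and everything binary, the loop counts runsF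
lemma loopA_eq : ∀ (fuel : Nat) (p : List Int) (freed : List Int) (motion : Bool),
    (∀ x ∈ p, x = 0 ∨ x = 1) → p.length < fuel →
    loopA fuel p (p.map (fun x => 1 - x)) freed motion
      = (freed.length : Int) + runsF p (if motion then 1 else 0) := by
  intro fuel
  induction fuel with
  | zero => intro p freed motion _ h; omega
  | succ n ih =>
    intro p freed motion hb hlen
    have hdropb : ∀ (i : Nat), ∀ x ∈ p.drop (i + 1), x = 0 ∨ x = 1 :=
      fun i x hx => hb x (List.mem_of_mem_drop hx)
    cases motion with
    | true =>
      by_cases hc : (1 : Int) ∈ p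
      · rcases hi : PySem.List.index? p 1 with _ | i
        · exact absurd ((PySem.List.index?_eq_none_iff p 1).mp hi) (by simp [hc])
        · obtain ⟨hk, -, -⟩ := PySem.List.getElem_of_index?_eq_some hi
          have hcl := clearList_eq i p (p.map (fun x => 1 - x)) hk (by simpa using hk)
          simp only [loopA, Bool.true_and, Bool.not_true, Bool.false_and, Bool.or_false,
            hi, hcl, ← List.map_drop,
            show p.contains 1 = true by simpa [List.contains_eq_mem] using hc, if_true]
          rw [ih (p.drop (i + 1)) (freed ++ [(i : Int)]) false (hdropb i)
                (by simp only [List.length_drop]; omega)]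
          rw [runsF_of_index_some hi]
          simp only [List.length_append, List.length_cons, List.length_nil,
            Bool.false_eq_true, if_false]
          push_cast
          ring
      · simp only [loopA, Bool.true_and, Bool.not_true, Bool.false_and, Bool.or_false,
          show p.contains 1 = false by simpa [List.contains_eq_mem] using hc,
          Bool.false_eq_true, if_false]
        simp [runsF_of_index_none ((PySem.List.index?_eq_none_iff p 1).mpr hc)]
    | false =>
      by_cases hc : (0 : Int) ∈ p
      · rcases hi : PySem.List.index? p 0 with _ | i
        · exact absurd ((PySem.List.index?_eq_none_iff p 0).mp hi) (by simp [hc])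
        · obtain ⟨hk, -, -⟩ := PySem.List.getElem_of_index?_eq_some hi
          have hcl := clearList_eq i p (p.map (fun x => 1 - x)) hk (by simpa using hk)
          simp only [loopA, Bool.false_and, Bool.not_false, Bool.true_and, Bool.false_or,
            contains_flip, index_flip, hi, hcl, ← List.map_drop,
            show p.contains 0 = true by simpa [List.contains_eq_mem] using hc, if_true,
            Bool.false_eq_true, if_false]
          rw [ih (p.drop (i + 1)) (freed ++ [(i : Int)]) true (hdropb i)
                (by simp only [List.length_drop]; omega)]
          rw [runsF_of_index_some hi]
          simp only [List.length_append, List.length_cons, List.length_nil, if_true]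
          push_cast
          ring
      · simp only [loopA, Bool.false_and, Bool.not_false, Bool.true_and, Bool.false_or,
          contains_flip,
          show p.contains 0 = false by simpa [List.contains_eq_mem] using hc,
          Bool.false_eq_true, if_false]
        simp [runsF_of_index_none ((PySem.List.index?_eq_none_iff p 0).mpr hc)]

-- for binary lists, the alternating search counts 1 + transitions
lemma runsF_eq_transR : ∀ (p : List Int) (t : Int),
    (∀ x ∈ p, x = 0 ∨ x = 1) → (t = 0 ∨ t = 1) →
    runsF p (1 - t) = transR (t :: p) := by
  intro p
  induction p with
  | nil =>
    intro t _ _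
    rw [runsF_of_index_none ((PySem.List.index?_eq_none_iff [] (1 - t)).mpr (by simp))]
    rfl
  | cons x p ih =>
    intro t hb ht
    have hx := hb x (by simp)
    have hb' : ∀ y ∈ p, y = 0 ∨ y = 1 := fun y hy => hb y (by simp [hy])
    by_cases hxt : x = t
    · subst hxt
      rw [runsF_cons_ne p (by omega : x ≠ 1 - x), ih x hb' hx]
      rw [show transR (x :: x :: p) = (if x ≠ x then 1 else 0) + transR (x :: p) from rfl]
      simp
    · have hx' : x = 1 - t := by omega
      rw [show runsF (x :: p) (1 - t) = 1 + runsF p (1 - (1 - t)) from by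
            rw [hx']; exact runsF_cons_self (1 - t) p]
      rw [ih (1 - t) hb' (by omega)]
      rw [show transR (t :: x :: p) = (if x ≠ t then 1 else 0) + transR (x :: p) from rfl, hx']
      have h2 : (1 : Int) - t ≠ t := by omega
      simp [h2]

-- ===== VERDICT (by name: the statement is the Claim_ definition above) =====
theorem set_free_spec : Claim_equal_set_free := by
  intro prison _ hpre
  obtain ⟨hne, hb⟩ := hpre
  unfold Spec_set_free set_free set_free_alt
  cases prison with
  | nil => exact absurd rfl hne
  | cons a p =>
    rw [PySem.List.pyGet?_zero_cons]
    by_cases ha : a = 1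
    · subst ha
      have hbin : ∀ x ∈ (1 : Int) :: p, x = 0 ∨ x = 1 := hb (by simp)
      have hbin' : ∀ x ∈ p, x = 0 ∨ x = 1 := fun x hx => hbin x (by simp [hx])
      simp only [ne_eq, not_true_eq_false, if_false]
      rw [buildAlt_eq _ hbin, loopA_eq _ _ _ _ hbin (by omega)]
      rw [if_pos rfl, runsF_cons_self,
          runsF_eq_transR p 1 hbin' (by right; rfl)]
      rw [foldTrans]
      simp
    · simp [ha]
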